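-- pv_equiv track=rewrite | github.com/HithaloCesar/mc102 | lab7.py | most_consecutive_occurrence
-- ===== SOURCE A (Python) =====
-- from typing import List
--
-- def without_equal_consecutive(list_: List[str]):
--     """Dada uma lista de strings, retorna uma nova lista de strings com os
--     mesmos elementos, mas sem elementos iguais consecutivos.
--     """
--     new_list = [list_[0]]
--     for element in list_:
--         if element != new_list[-1]:
--             new_list.append(element)
--     return new_list
--
-- def most_consecutive_occurrence(list_: List[str]):
--     """Dada uma lista de strings, retorna o elemento que se mais se repete
--     de forma consecutiva e quantas vezes ela se repete.
--     """
--     no_equal_consecutive = without_equal_consecutive(list_)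
--     element_count = []
--     starting_index = 0
--     for i in range(len(no_equal_consecutive)):
--         element_count.append(0)
--         for j in range(starting_index, len(list_)):
--             if list_[j] == no_equal_consecutive[i]:
--                 element_count[i] += 1
--                 starting_index += 1
--             else:
--                 break
--     return (
--         no_equal_consecutive[element_count.index(max(element_count))],
--         (max(element_count))
--     )
-- ===== SOURCE B (Python) =====
-- from typing import List
--
-- def most_consecutive_occurrence(list_: List[str]):
--     """Single-pass run-length scan: track the current run and the best run
--     seen so far (strict '>' so the first maximal run wins)."""
--     current = list_[0]
--     count = 1
--     best_element, best_count = current, 0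
--     for element in list_[1:]:
--         if element == current:
--             count += 1
--         else:
--             if count > best_count:
--                 best_element, best_count = current, count
--             current, count = element, 1
--     if count > best_count:
--         best_element, best_count = current, count
--     return (best_element, best_count)
-- ===== Notes on version B (the rewrite author's own statement) =====
-- stated objective: simpler
-- what changed: Replaced A's two-phase scheme (build the list of run heads with without_equal_consecutive, then re-scan the input with a nested indexed loop to count each run, then max+index) by a single left-to-right pass that tracks the current run and the best run with a strict '>' update so the first maximal run wins; one pass and no intermediate lists gives a constant-factor speedup.
import Mathlib
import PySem

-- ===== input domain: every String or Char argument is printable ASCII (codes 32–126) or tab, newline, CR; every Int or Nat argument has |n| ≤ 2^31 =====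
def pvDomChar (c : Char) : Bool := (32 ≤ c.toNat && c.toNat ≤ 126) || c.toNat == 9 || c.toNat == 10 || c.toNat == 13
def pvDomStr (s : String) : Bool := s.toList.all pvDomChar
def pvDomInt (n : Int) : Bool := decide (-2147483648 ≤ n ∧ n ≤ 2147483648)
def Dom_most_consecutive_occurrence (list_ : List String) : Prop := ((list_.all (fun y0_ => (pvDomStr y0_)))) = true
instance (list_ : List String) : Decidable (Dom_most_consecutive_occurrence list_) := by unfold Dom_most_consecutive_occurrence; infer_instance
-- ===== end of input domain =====

-- B replaces A's two-phase run-head/run-count scheme by a single-pass run tracker; same return value on every non-empty list (A raises IndexError on []).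


-- ===== PORT A =====
-- without_equal_consecutive: new_list = [list_[0]]; for element in list_: append if element != new_list[-1]
def pvWecA (list_ : List String) (x0 : String) : List String :=
  list_.foldl (fun nl e => if e ≠ (PySem.List.pyGet? nl (-1)).getD "" then nl ++ [e] else nl) [x0]

-- the inner 'for j in range(starting_index, len(list_))' loop with its break; returns (element_count[i], starting_index)
def pvInnerA (list_ : List String) (head : String) (j : Nat) (cnt : Int) (si : Nat) : Int × Nat :=
  if h : j < list_.length then
    if list_[j] = head then pvInnerA list_ head (j + 1) (cnt + 1) (si + 1)
    else (cnt, si)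
  else (cnt, si)
termination_by list_.length - j

def most_consecutive_occurrence (list_ : List String) : String × Int :=
  match list_ with
  | [] => ("", 0)  -- list_[0] raises IndexError in Python; excluded by Pre_
  | x :: _ =>
    let nec := pvWecA list_ x
    let st := nec.foldl (fun (st : List Int × Nat) h =>
        let r := pvInnerA list_ h st.2 0 st.2
        (st.1 ++ [r.1], r.2)) ([], 0)
    let ec := st.1
    let m := (PySem.List.max? ec (fun y => y)).getD 0
    let idx := (PySem.List.index? ec m).getD 0
    ((PySem.List.pyGet? nec (idx : Int)).getD "", m)

-- ===== PORT B =====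
-- one step of the single-pass run tracker; state = (current, count, best_element, best_count)
def pvStepB (s : String × Int × String × Int) (e : String) : String × Int × String × Int :=
  if e = s.1 then (s.1, s.2.1 + 1, s.2.2.1, s.2.2.2)
  else if s.2.1 > s.2.2.2 then (e, 1, s.1, s.2.1)
  else (e, 1, s.2.2.1, s.2.2.2)

def most_consecutive_occurrence_alt (list_ : List String) : String × Int :=
  match list_ with
  | [] => ("", 0)  -- list_[0] raises IndexError in Python; excluded by Pre_
  | x :: xs =>
    let s := xs.foldl pvStepB (x, 1, x, 0)
    if s.2.1 > s.2.2.2 then (s.1, s.2.1) else (s.2.2.1, s.2.2.2)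

-- ===== PRECONDITION & SPEC =====
-- A evaluates list_[0] first, so it raises IndexError on the empty list; on every other list it returns.
def Pre_most_consecutive_occurrence (list_ : List String) : Prop := list_ ≠ []
instance (list_ : List String) : Decidable (Pre_most_consecutive_occurrence list_) := by unfold Pre_most_consecutive_occurrence; infer_instance
def pvWitness_most_consecutive_occurrence : List String := ["a", "a", "b"]

def Spec_most_consecutive_occurrence (list_ : List String) (out : String × Int) : Prop := out = most_consecutive_occurrence_alt list_
instance (list_ : List String) (out : String × Int) : Decidable (Spec_most_consecutive_occurrence list_ out) := by unfold Spec_most_consecutive_occurrence; infer_instance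

-- ===== CLAIM (what is proved, stated in full; the proofs are below) =====
def Claim_equal_most_consecutive_occurrence : Prop := ∀ (list_ : List String), Dom_most_consecutive_occurrence list_ → Pre_most_consecutive_occurrence list_ → Spec_most_consecutive_occurrence list_ (most_consecutive_occurrence list_)

-- ===== LEMMAS AND PROOFS =====

-- run-length encoding of the input, one run at a time
def pvRuns : List String → List (String × Int)
  | [] => []
  | y :: ys =>
      (y, 1 + ((ys.takeWhile (· == y)).length : Int)) :: pvRuns (ys.dropWhile (· == y))
termination_by l => l.length
decreasing_by
  simpa using Nat.lt_succ_of_le (List.length_dropWhile_le (· == y) ys)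

-- the first run of maximal length (strict '>' keeps the leftmost maximum)
def pvFirstMax : List (String × Int) → String × Int
  | [] => ("", 0)
  | (h, k) :: rest =>
      let r := pvFirstMax rest
      if r.2 > k then r else (h, k)

-- B's best-run update, as a fold over runs
def pvBestFold (b : String × Int) (rs : List (String × Int)) : String × Int :=
  rs.foldl (fun b p => if p.2 > b.2 then p else b) b

-- the runs still to come, seen from a mid-run state (cur, cnt)
def pvRunsAux (cur : String) (cnt : Int) : List String → List (String × Int)
  | [] => [(cur, cnt)]
  | y :: ys => if y = cur then pvRunsAux cur (cnt + 1) ys else (cur, cnt) :: pvRunsAux y 1 ys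

-- heads of the remaining runs, as produced by without_equal_consecutive's loop
def pvHeadsFrom (x : String) : List String → List String
  | [] => []
  | y :: ys => if y = x then pvHeadsFrom x ys else y :: pvHeadsFrom y ys

theorem pvWec_fold (l : List String) : ∀ (nl : List String), nl ≠ [] →
    l.foldl (fun nl e => if e ≠ (PySem.List.pyGet? nl (-1)).getD "" then nl ++ [e] else nl) nl
      = nl ++ pvHeadsFrom ((PySem.List.pyGet? nl (-1)).getD "") l := by
  induction l with
  | nil => intro nl h; simp [pvHeadsFrom]
  | cons e l ih =>
    intro nl h
    simp only [List.foldl_cons]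
    by_cases he : e = (PySem.List.pyGet? nl (-1)).getD ""
    · rw [if_neg (by simp [he]), ih nl h, pvHeadsFrom, if_pos he]
    · rw [if_pos (by simp [he]), ih (nl ++ [e]) (by simp),
        PySem.List.pyGet?_neg_one, List.getLast?_concat]
      rw [pvHeadsFrom, if_neg he, List.append_assoc]
      rfl

theorem pvHeadsFrom_eq (l : List String) : ∀ (x : String),
    pvHeadsFrom x l = (pvRuns (l.dropWhile (· == x))).map Prod.fst := by
  induction l with
  | nil => intro x; simp [pvHeadsFrom, pvRuns]
  | cons y ys ih =>
    intro x
    by_cases hy : y = x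
    · rw [pvHeadsFrom, if_pos hy, List.dropWhile_cons, if_pos (by simp [hy]), ih x]
    · rw [pvHeadsFrom, if_neg hy, List.dropWhile_cons, if_neg (by simp [hy]), pvRuns]
      simp only [List.map_cons]
      rw [ih y]

theorem pvInnerA_spec (list_ : List String) (hd : String) :
    ∀ j cnt si, pvInnerA list_ hd j cnt si
      = (cnt + (((list_.drop j).takeWhile (· == hd)).length : Int),
         si + ((list_.drop j).takeWhile (· == hd)).length) := by
  intro j
  induction hj : list_.length - j using Nat.strong_induction_on generalizing j with
  | _ n ih =>
  intro cnt si
  rw [pvInnerA]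
  by_cases h : j < list_.length
  · rw [dif_pos h, List.drop_eq_getElem_cons h, List.takeWhile_cons]
    by_cases he : list_[j] = hd
    · rw [if_pos he, if_pos (by simp [he])]
      rw [ih (list_.length - (j+1)) (by omega) (j+1) rfl]
      simp only [List.length_cons]
      refine Prod.ext ?_ ?_ <;> simp <;> ring
    · rw [if_neg he, if_neg (by simp [he])]
      simp
  · rw [dif_neg h, List.drop_of_length_le (by omega)]
    simp

theorem pvRuns_pos : ∀ (s : List String), ∀ p ∈ pvRuns s, 1 ≤ p.2 := by
  intro s
  induction s using pvRuns.induct with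
  | case1 => simp [pvRuns]
  | case2 y ys ih =>
    rw [pvRuns]
    intro p hp
    rw [List.mem_cons] at hp
    rcases hp with rfl | hp
    · simp
    · exact ih p hp

theorem pvOuter_fold (list_ : List String) :
    ∀ (n : Nat) (s : List String) (si : Nat) (ec : List Int), s.length ≤ n → list_.drop si = s →
    ((pvRuns s).map Prod.fst).foldl (fun (st : List Int × Nat) h =>
        let r := pvInnerA list_ h st.2 0 st.2
        (st.1 ++ [r.1], r.2)) (ec, si)
      = (ec ++ (pvRuns s).map Prod.snd, si + s.length) := by
  intro n
  induction n with
  | zero =>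
    intro s si ec hlen hdrop
    have : s = [] := List.eq_nil_of_length_eq_zero (by omega)
    subst this; simp [pvRuns]
  | succ n ih =>
    intro s si ec hlen hdrop
    match s with
    | [] => simp [pvRuns]
    | y :: ys =>
      rw [pvRuns]
      simp only [List.map_cons, List.foldl_cons]
      rw [pvInnerA_spec]
      have htw : (list_.drop si).takeWhile (· == y) = y :: ys.takeWhile (· == y) := by
        rw [hdrop, List.takeWhile_cons, if_pos (by simp)]
      set k : Nat := (ys.takeWhile (· == y)).length with hk
      have hlen_tw : ((list_.drop si).takeWhile (· == y)).length = k + 1 := by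
        rw [htw]; simp [hk]
      have hdrop' : list_.drop (si + (k + 1)) = ys.dropWhile (· == y) := by
        have h1 : list_.drop (si + (k + 1)) = (list_.drop si).drop (k + 1) := by
          rw [List.drop_drop]
        rw [h1, hdrop]
        have h2 : (y :: ys) = (y :: ys).takeWhile (· == y) ++ (y :: ys).dropWhile (· == y) :=
          (List.takeWhile_append_dropWhile).symm
        have h3 : ((y :: ys).takeWhile (· == y)).length = k + 1 := by
          rw [List.takeWhile_cons, if_pos (by simp)]; simp [hk]
        calc (y :: ys).drop (k + 1)
            = ((y :: ys).takeWhile (· == y) ++ (y :: ys).dropWhile (· == y)).drop (k+1) := by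
              rw [← h2]
          _ = (y :: ys).dropWhile (· == y) := by rw [← h3, List.drop_left]
          _ = ys.dropWhile (· == y) := by rw [List.dropWhile_cons, if_pos (by simp)]
      have hrec := ih (ys.dropWhile (· == y)) (si + (k + 1)) (ec ++ [(0 : Int) + (((list_.drop si).takeWhile (· == y)).length : Int)])
        (by have := List.length_dropWhile_le (· == y) ys; simp only [List.length_cons] at hlen; omega)
        hdrop'
      rw [hlen_tw] at hrec ⊢
      rw [hrec]
      have hsum : k + (ys.dropWhile (· == y)).length = ys.length := by
        have h2 := congrArg List.length (List.takeWhile_append_dropWhile (p := (· == y)) (l := ys))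
        simp only [List.length_append] at h2
        omega
      refine Prod.ext ?_ ?_
      · simp only [List.append_assoc, List.singleton_append]
        congr 2
        push_cast
        ring
      · simp only [List.length_cons]
        omega

theorem pvFirstMax_pos (rs : List (String × Int)) (h : ∀ p ∈ rs, 1 ≤ p.2) (hne : rs ≠ []) :
    1 ≤ (pvFirstMax rs).2 := by
  match rs with
  | (a, b) :: rest =>
    rw [pvFirstMax]
    have hb : 1 ≤ b := h (a, b) (by simp)
    split <;> omega

theorem pvFoldlMax (rs : List (String × Int)) : ∀ (k : Int), (∀ p ∈ rs, 0 ≤ p.2) → 0 ≤ k →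
    (rs.map Prod.snd).foldl max k = max k (pvFirstMax rs).2 := by
  induction rs with
  | nil => intro k _ hk; simp [pvFirstMax]; omega
  | cons p rest ih =>
    intro k h hk
    obtain ⟨a, b⟩ := p
    have hb : 0 ≤ b := h (a, b) (by simp)
    simp only [List.map_cons, List.foldl_cons]
    rw [ih (max k b) (fun q hq => h q (by simp [hq])) (by omega), pvFirstMax]
    split <;> rename_i hsplit <;> simp [max_def] <;> split_ifs <;> omega

theorem pvFirstMax_max (rs : List (String × Int)) (hpos : ∀ p ∈ rs, 0 ≤ p.2) (hne : rs ≠ []) :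
    PySem.List.max? (rs.map Prod.snd) (fun y => y) = some (pvFirstMax rs).2 := by
  match rs with
  | (a, b) :: rest =>
    simp only [List.map_cons]
    rw [PySem.List.max?_id_cons]
    have hb : 0 ≤ b := hpos (a, b) (by simp)
    rw [pvFoldlMax rest b (fun q hq => hpos q (by simp [hq])) hb, pvFirstMax]
    split <;> rename_i hs
    · simp [max_def]; omega
    · simp [max_def]; omega

theorem pvFirstMax_index (rs : List (String × Int)) (hpos : ∀ p ∈ rs, 0 ≤ p.2) (hne : rs ≠ []) :
    ∃ i : Nat, PySem.List.index? (rs.map Prod.snd) (pvFirstMax rs).2 = some i ∧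
      (rs.map Prod.fst)[i]? = some (pvFirstMax rs).1 := by
  induction rs with
  | nil => simp at hne
  | cons p rest ih =>
    obtain ⟨a, b⟩ := p
    have hb : 0 ≤ b := hpos (a, b) (by simp)
    have hposr : ∀ q ∈ rest, 0 ≤ q.2 := fun q hq => hpos q (by simp [hq])
    rw [pvFirstMax]
    by_cases hgt : (pvFirstMax rest).2 > b
    · rw [if_pos hgt]
      have hrne : rest ≠ [] := by
        rintro rfl
        simp [pvFirstMax] at hgt
        omega
      obtain ⟨i, hi, hg⟩ := ih hposr hrne
      refine ⟨i + 1, ?_, ?_⟩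
      · simp only [List.map_cons]
        rw [PySem.List.index?_cons_of_ne _ (by omega), hi]
        rfl
      · simpa using hg
    · rw [if_neg hgt]
      refine ⟨0, ?_, ?_⟩
      · simp only [List.map_cons]
        exact PySem.List.index?_cons_self _ _
      · simp

theorem pvBestFold_eq (rs : List (String × Int)) : ∀ (b : String × Int), 0 ≤ b.2 →
    pvBestFold b rs = if (pvFirstMax rs).2 > b.2 then pvFirstMax rs else b := by
  induction rs with
  | nil =>
    intro b hb
    rw [pvBestFold, List.foldl_nil, pvFirstMax, if_neg (by dsimp; omega)]
  | cons p rest ih =>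
    intro b hb
    obtain ⟨a, c⟩ := p
    rw [pvBestFold, List.foldl_cons]
    by_cases h1 : c > b.2
    · rw [if_pos (show (a, c).2 > b.2 from h1)]
      rw [show List.foldl (fun b p => if p.2 > b.2 then p else b) (a, c) rest = pvBestFold (a, c) rest from rfl]
      rw [ih (a, c) (by omega), pvFirstMax]
      by_cases h2 : (pvFirstMax rest).2 > c
      · rw [if_pos (show (pvFirstMax rest).2 > (a, c).2 from h2),
          if_pos (show (pvFirstMax rest).2 > b.2 by omega)]
      · rw [if_neg (show ¬ (pvFirstMax rest).2 > (a, c).2 from h2),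
          if_pos (show ((a, c) : String × Int).2 > b.2 from h1)]
    · rw [if_neg (show ¬ (a, c).2 > b.2 from h1)]
      rw [show List.foldl (fun b p => if p.2 > b.2 then p else b) b rest = pvBestFold b rest from rfl]
      rw [ih b hb, pvFirstMax]
      by_cases h2 : (pvFirstMax rest).2 > c
      · rw [if_pos h2]
      · rw [if_neg h2]
        by_cases h3 : (pvFirstMax rest).2 > b.2
        · omega
        · rw [if_neg h3, if_neg (show ¬ ((a, c) : String × Int).2 > b.2 from h1)]

theorem pvRunsAux_eq (l : List String) : ∀ (cur : String) (cnt : Int),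
    pvRunsAux cur cnt l
      = (cur, cnt + ((l.takeWhile (· == cur)).length : Int)) :: pvRuns (l.dropWhile (· == cur)) := by
  induction l with
  | nil => intro cur cnt; simp [pvRunsAux, pvRuns]
  | cons y ys ih =>
    intro cur cnt
    by_cases hy : y = cur
    · rw [pvRunsAux, if_pos hy, ih cur (cnt + 1),
        List.takeWhile_cons, if_pos (by simp [hy]), List.dropWhile_cons, if_pos (by simp [hy])]
      simp only [List.length_cons]
      congr 2
      push_cast
      ring
    · rw [pvRunsAux, if_neg hy, ih y 1,
        List.takeWhile_cons, if_neg (by simp [hy]), List.dropWhile_cons, if_neg (by simp [hy]),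
        pvRuns]
      simp

theorem pvFoldB_eq (l : List String) : ∀ (cur : String) (cc : Int) (be : String) (bc : Int),
    (let s := l.foldl pvStepB (cur, cc, be, bc);
     if s.2.1 > s.2.2.2 then (s.1, s.2.1) else (s.2.2.1, s.2.2.2))
      = pvBestFold (be, bc) (pvRunsAux cur cc l) := by
  induction l with
  | nil =>
    intro cur cc be bc
    simp only [List.foldl_nil, pvRunsAux, pvBestFold, List.foldl_cons, List.foldl_nil]
  | cons e l ih =>
    intro cur cc be bc
    simp only [List.foldl_cons]
    rw [pvRunsAux]
    by_cases he : e = cur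
    · rw [if_pos he]
      have hstep : pvStepB (cur, cc, be, bc) e = (cur, cc + 1, be, bc) := by
        rw [pvStepB, if_pos he]
      rw [hstep]
      exact ih cur (cc + 1) be bc
    · rw [if_neg he]
      by_cases hb : cc > bc
      · have hstep : pvStepB (cur, cc, be, bc) e = (e, 1, cur, cc) := by
          rw [pvStepB, if_neg he, if_pos hb]
        rw [hstep, ih e 1 cur cc]
        conv_rhs => rw [pvBestFold, List.foldl_cons]
        rw [if_pos (show ((cur, cc) : String × Int).2 > ((be, bc) : String × Int).2 from hb)]
        rfl
      · have hstep : pvStepB (cur, cc, be, bc) e = (e, 1, be, bc) := by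
          rw [pvStepB, if_neg he, if_neg hb]
        rw [hstep, ih e 1 be bc]
        conv_rhs => rw [pvBestFold, List.foldl_cons]
        rw [if_neg (show ¬ ((cur, cc) : String × Int).2 > ((be, bc) : String × Int).2 from hb)]
        rfl

-- ===== VERDICT (by name: the statement is the Claim_ definition above) =====
theorem most_consecutive_occurrence_spec : Claim_equal_most_consecutive_occurrence := by
  unfold Claim_equal_most_consecutive_occurrence
  intro list_ _ hpre
  unfold Spec_most_consecutive_occurrence
  match list_, hpre with
  | x :: xs, _ =>
    set rs := pvRuns (x :: xs) with hrs
    have hpos1 : ∀ p ∈ rs, 1 ≤ p.2 := pvRuns_pos (x :: xs)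
    have hpos0 : ∀ p ∈ rs, 0 ≤ p.2 := fun p hp => le_trans (by norm_num) (hpos1 p hp)
    have hne : rs ≠ [] := by rw [hrs, pvRuns]; simp
    -- the run heads produced by without_equal_consecutive
    have hnec : pvWecA (x :: xs) x = rs.map Prod.fst := by
      rw [pvWecA, pvWec_fold (x :: xs) [x] (by simp)]
      simp only [PySem.List.pyGet?_neg_one, List.getLast?_singleton, Option.getD_some]
      rw [pvHeadsFrom, if_pos rfl, pvHeadsFrom_eq xs x, hrs, pvRuns]
      simp
    -- the element_count list produced by the nested counting loops
    have houter := pvOuter_fold (x :: xs) (x :: xs).length (x :: xs) 0 [] le_rfl (by simp)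
    -- B's single pass computes the first maximal run
    have hB : most_consecutive_occurrence_alt (x :: xs) = pvFirstMax rs := by
      show (let s := xs.foldl pvStepB (x, 1, x, 0);
            if s.2.1 > s.2.2.2 then (s.1, s.2.1) else (s.2.2.1, s.2.2.2)) = pvFirstMax rs
      rw [pvFoldB_eq xs x 1 x 0]
      have haux : pvRunsAux x 1 xs = rs := by
        rw [pvRunsAux_eq xs x 1, hrs, pvRuns]
      rw [haux, pvBestFold_eq rs (x, 0) (by norm_num)]
      rw [if_pos (show (pvFirstMax rs).2 > ((x, 0) : String × Int).2 by
        have := pvFirstMax_pos rs hpos1 hne; simpa using by omega)]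
    -- A's max/index lookup computes the same pair
    have hA : most_consecutive_occurrence (x :: xs) = pvFirstMax rs := by
      show ((PySem.List.pyGet? (pvWecA (x :: xs) x)
              ((((PySem.List.index? ((pvWecA (x :: xs) x).foldl (fun (st : List Int × Nat) h =>
                  let r := pvInnerA (x :: xs) h st.2 0 st.2
                  (st.1 ++ [r.1], r.2)) ([], 0)).1
                ((PySem.List.max? ((pvWecA (x :: xs) x).foldl (fun (st : List Int × Nat) h =>
                  let r := pvInnerA (x :: xs) h st.2 0 st.2
                  (st.1 ++ [r.1], r.2)) ([], 0)).1 (fun y => y)).getD 0)).getD 0 : Nat) : Int))).getD "",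
            (PySem.List.max? ((pvWecA (x :: xs) x).foldl (fun (st : List Int × Nat) h =>
                  let r := pvInnerA (x :: xs) h st.2 0 st.2
                  (st.1 ++ [r.1], r.2)) ([], 0)).1 (fun y => y)).getD 0) = pvFirstMax rs
      rw [hnec, houter]
      simp only [List.nil_append]
      rw [pvFirstMax_max rs hpos0 hne, Option.getD_some]
      obtain ⟨i, hi, hg⟩ := pvFirstMax_index rs hpos0 hne
      rw [hi, Option.getD_some, PySem.List.pyGet?_natCast, hg, Option.getD_some]
    rw [hA, hB]
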